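-- pv_equiv track=rewrite | github.com/brg015/learn_dutch | core/session_builders/pool_utils.py | fill_in_order
-- ===== SOURCE A (Python) =====
-- from typing import TypeVar
--
-- T = TypeVar("T")
--
-- def fill_in_order(
--     pools: dict[str, list[T]],
--     order: list[str],
--     target_size: int
-- ) -> list[T]:
--     """
--     Fill a session by walking pools in order until target_size is reached.
--     """
--     session: list[T] = []
--     for name in order:
--         for item in pools.get(name, []):
--             if len(session) >= target_size:
--                 return session
--             session.append(item)
--     return session
-- ===== SOURCE B (Python) =====
-- def fill_in_order(pools, order, target_size):
--     # Stage 1: flatten all pools in the requested order, ignoring the cap.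
--     full = [item for name in order for item in pools.get(name, [])]
--     # Stage 2: truncate once to the (clamped) target size.
--     return full[:max(0, target_size)]
-- ===== Notes on version B (the rewrite author's own statement) =====
-- stated objective: simpler
-- what changed: B replaces A's incremental cap-guarded fill (nested loops with an early return once the session is full) by two independent stages: flatten every pool in order into one list, then truncate that list once to the clamped target size.
import Mathlib
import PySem

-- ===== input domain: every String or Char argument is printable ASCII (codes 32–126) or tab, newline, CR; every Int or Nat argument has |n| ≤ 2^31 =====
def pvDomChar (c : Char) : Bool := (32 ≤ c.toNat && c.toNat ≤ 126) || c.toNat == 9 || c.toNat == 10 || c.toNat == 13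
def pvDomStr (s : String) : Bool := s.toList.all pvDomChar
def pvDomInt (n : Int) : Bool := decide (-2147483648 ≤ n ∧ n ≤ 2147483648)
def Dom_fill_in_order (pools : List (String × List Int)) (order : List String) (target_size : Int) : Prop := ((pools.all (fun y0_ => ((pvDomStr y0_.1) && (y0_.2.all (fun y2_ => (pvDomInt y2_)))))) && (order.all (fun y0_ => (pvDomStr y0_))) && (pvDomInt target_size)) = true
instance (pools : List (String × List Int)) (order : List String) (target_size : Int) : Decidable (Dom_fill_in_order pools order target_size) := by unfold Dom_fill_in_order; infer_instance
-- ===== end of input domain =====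

-- B flattens all pools in order, then truncates once to the clamped target size, instead of A's cap-guarded incremental fill; objective: simpler.

-- dict lookup pools.get(name, []): first-match association-list lookup (exact for the assoc-list dict convention)
def poolGet (pools : List (String × List Int)) (name : String) : List Int :=
  (pools.lookup name).getD []

-- ===== PORT A =====
-- inner loop over one pool's items: returns (session, earlyReturn?)
def fillA_inner (target_size : Int) : List Int → List Int → (List Int × Bool)
  | [], session => (session, false)
  | item :: rest, session =>
      if (session.length : Int) ≥ target_size then (session, true)
      else fillA_inner target_size rest (session ++ [item])

-- outer loop over order; a true flag is Python's `return session`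
def fillA_outer (pools : List (String × List Int)) (target_size : Int) : List String → List Int → List Int
  | [], session => session
  | name :: rest, session =>
      match fillA_inner target_size (poolGet pools name) session with
      | (session', true) => session'
      | (session', false) => fillA_outer pools target_size rest session'

def fill_in_order (pools : List (String × List Int)) (order : List String) (target_size : Int) : List Int :=
  fillA_outer pools target_size order []

-- ===== PORT B =====
-- stage 1: the flattening comprehension; stage 2: one truncating slice full[:max(0, target_size)]
def fill_in_order_alt (pools : List (String × List Int)) (order : List String) (target_size : Int) : List Int :=
  let full := order.flatMap (fun name => poolGet pools name)
  PySem.List.slice full none (some (max 0 target_size))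

-- ===== PRECONDITION & SPEC =====
def Spec_fill_in_order (pools : List (String × List Int)) (order : List String) (target_size : Int) (out : List Int) : Prop := out = fill_in_order_alt pools order target_size
instance (pools : List (String × List Int)) (order : List String) (target_size : Int) (out : List Int) : Decidable (Spec_fill_in_order pools order target_size out) := by unfold Spec_fill_in_order; infer_instance

-- ===== CLAIM (what is proved, stated in full; the proofs are below) =====
def Claim_equal_fill_in_order : Prop := ∀ (pools : List (String × List Int)) (order : List String) (target_size : Int), Dom_fill_in_order pools order target_size → Spec_fill_in_order pools order target_size (fill_in_order pools order target_size)

-- ===== LEMMAS AND PROOFS =====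

-- the inner loop appends exactly the clamped prefix of the pool
theorem fillA_inner_fst (t : Int) (items : List Int) (s : List Int) :
    (fillA_inner t items s).1 = s ++ items.take (t - (s.length : Int)).toNat := by
  induction items generalizing s with
  | nil => simp [fillA_inner]
  | cons i rest ih =>
      by_cases h : (s.length : Int) ≥ t
      · have : (t - (s.length : Int)).toNat = 0 := by omega
        simp [fillA_inner, h, this]
      · have hpos : (t - (s.length : Int)).toNat = (t - ((s.length : Int) + 1)).toNat + 1 := by omega
        simp only [fillA_inner, if_neg h, ih]
        simp [hpos, List.take_succ_cons]

-- once the inner loop returns early, the session is full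
theorem fillA_inner_snd (t : Int) (items : List Int) (s : List Int) :
    (fillA_inner t items s).2 = true → t ≤ ((fillA_inner t items s).1.length : Int) := by
  induction items generalizing s with
  | nil => simp [fillA_inner]
  | cons i rest ih =>
      by_cases h : (s.length : Int) ≥ t
      · simp [fillA_inner, h]
      · simpa [fillA_inner, h] using ih (s ++ [i])

-- A's outer loop extends the session by the clamped prefix of the flattened remaining pools
theorem fillA_outer_take (pools : List (String × List Int)) (t : Int) (names : List String)
    (s : List Int) :
    fillA_outer pools t names s
      = s ++ (names.flatMap (fun name => poolGet pools name)).take (t - (s.length : Int)).toNat := by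
  induction names generalizing s with
  | nil => simp [fillA_outer]
  | cons name rest ih =>
      have hfst := fillA_inner_fst t (poolGet pools name) s
      have hsnd := fillA_inner_snd t (poolGet pools name) s
      simp only [fillA_outer, List.flatMap_cons, List.take_append]
      rcases heq : fillA_inner t (poolGet pools name) s with ⟨s', b⟩
      rw [heq] at hfst hsnd; simp only at hfst hsnd
      subst hfst
      cases b with
      | true =>
          have hfull := hsnd rfl
          simp only [List.length_append, List.length_take] at hfull
          have h0 : (t - (s.length : Int)).toNat - (poolGet pools name).length = 0 := by omega
          dsimp only
          rw [h0]
          simp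
      | false =>
          dsimp only
          rw [ih]
          have harith : (t - (((s ++ (poolGet pools name).take (t - (s.length : Int)).toNat).length : ℕ) : Int)).toNat
              = (t - (s.length : Int)).toNat - (poolGet pools name).length := by
            simp only [List.length_append, List.length_take]
            omega
          rw [harith, List.append_assoc]

-- ===== VERDICT (by name: the statement is the Claim_ definition above) =====
theorem fill_in_order_spec : Claim_equal_fill_in_order := by
  intro pools order target_size _
  unfold Spec_fill_in_order fill_in_order fill_in_order_alt
  rw [fillA_outer_take]
  have hmax : (max 0 target_size) = (((max 0 target_size).toNat : ℕ) : Int) := by omega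
  rw [hmax, PySem.List.slice_to_natCast]
  have : (target_size - ((0:ℕ) : Int)).toNat = (max 0 target_size).toNat := by omega
  simp only [List.nil_append, List.length_nil]
  rw [this]
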